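-- pv_equiv track=rewrite | github.com/dangor/advent-of-code-2020 | day20/p2.py | extract_actual_image
-- ===== SOURCE A (Python) =====
-- def extract_actual_image(image):
--   actual_image = []
--   for tile_row in image:
--     strings = ['']*8
--     for tile in tile_row:
--       for i, string in enumerate(tile):
--         if i == 0 or i == 9:
--           continue
--         strings[i-1] += string[1:-1]
--     actual_image.extend(strings)
--   return actual_image
-- ===== SOURCE B (Python) =====
-- def extract_actual_image(image):
--   actual_image = []
--   for tile_row in image:
--     for i in range(1, 9):
--       actual_image.append(''.join(t[i][1:-1] for t in tile_row if i < len(t)))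
--   return actual_image
-- ===== Notes on version B (the rewrite author's own statement) =====
-- stated objective: simpler
-- what changed: A fills an 8-slot accumulator list tile by tile (enumerate with skip logic and string +=); B transposes the loops and emits each of the 8 interior rows directly as one ''.join over the tiles, with no accumulator list.
import Mathlib
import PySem

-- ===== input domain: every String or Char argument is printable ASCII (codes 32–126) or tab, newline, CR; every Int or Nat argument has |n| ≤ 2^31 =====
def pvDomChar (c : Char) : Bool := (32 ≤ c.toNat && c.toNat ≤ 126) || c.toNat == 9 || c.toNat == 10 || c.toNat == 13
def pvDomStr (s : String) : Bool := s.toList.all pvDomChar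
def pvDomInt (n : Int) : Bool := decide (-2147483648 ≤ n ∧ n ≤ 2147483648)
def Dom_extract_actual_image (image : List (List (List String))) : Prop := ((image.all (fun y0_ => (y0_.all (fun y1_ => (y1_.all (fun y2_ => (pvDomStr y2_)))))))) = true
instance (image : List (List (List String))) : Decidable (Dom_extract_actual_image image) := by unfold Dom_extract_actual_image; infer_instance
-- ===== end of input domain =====

-- B replaces A's 8-slot accumulator list (filled tile by tile via enumerate/skip and
-- string +=) by a transposed loop: per tile-row, each interior row index 1..8 is built
-- directly as one ''.join over the tiles; objective: simpler decomposition.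

-- row[1:-1]  (shared border-stripping helper, identical in both Pythons)
def pvMid (s : String) : String := PySem.Str.slice s (some 1) (some (-1))

-- ===== PORT A =====
def extract_actual_image (image : List (List (List String))) : List String :=
  image.foldl
    (fun actual_image tile_row =>
      actual_image ++
        tile_row.foldl
          (fun strings tile =>
            (PySem.List.enumerate tile).foldl
              (fun strings p =>
                if p.1 = 0 ∨ p.1 = 9 then strings
                else PySem.List.pySetD strings (p.1 - 1)
                      (PySem.List.pyGetD strings (p.1 - 1) "" ++ pvMid p.2))
              strings)
          (List.replicate 8 ""))
    []

-- ===== PORT B =====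
def extract_actual_image_alt (image : List (List (List String))) : List String :=
  image.foldl
    (fun actual_image tile_row =>
      actual_image ++
        (PySem.List.pyRange 1 9 1).map
          (fun i =>
            PySem.Str.join ""
              (tile_row.filterMap
                (fun t =>
                  if i < (t.length : Int) then some (pvMid (PySem.List.pyGetD t i ""))
                  else none))))
    []

-- ===== PRECONDITION & SPEC =====
-- A raises IndexError (strings[9]) as soon as some tile has 11 or more rows; Pre_
-- excludes exactly those inputs and nothing else.
def Pre_extract_actual_image (image : List (List (List String))) : Prop :=
  ∀ tile_row ∈ image, ∀ tile ∈ tile_row, tile.length ≤ 10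
instance (image : List (List (List String))) : Decidable (Pre_extract_actual_image image) := by
  unfold Pre_extract_actual_image; infer_instance

def pvWitness_extract_actual_image : List (List (List String)) :=
  [[["#.#", "a.b", "c#d", "e.f", "g#h", "i.j", "k#l", "m.n", "o#p", "#.#"]]]

def Spec_extract_actual_image (image : List (List (List String))) (out : List String) : Prop := out = extract_actual_image_alt image
instance (image : List (List (List String))) (out : List String) : Decidable (Spec_extract_actual_image image out) := by unfold Spec_extract_actual_image; infer_instance

-- ===== CLAIM (what is proved, stated in full; the proofs are below) =====
def Claim_equal_extract_actual_image : Prop := ∀ (image : List (List (List String))), Dom_extract_actual_image image → Pre_extract_actual_image image → Spec_extract_actual_image image (extract_actual_image image)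

-- ===== LEMMAS AND PROOFS =====

-- contribution of one tile to interior output row k (k = 0..7): its row k+1 stripped
def pvContrib (t : List String) (k : Nat) : String :=
  if k + 1 < t.length then pvMid (t.getD (k + 1) "") else ""

-- concatenation of the contributions of a list of tiles to output row k
def pvCol (tiles : List (List String)) (k : Nat) : String :=
  (tiles.map (fun t => pvContrib t k)).foldr (· ++ ·) ""

lemma pvFlattenIntersperse (l : List (List Char)) :
    (List.intersperse ([] : List Char) l).flatten = l.flatten := by
  induction l with
  | nil => simp
  | cons a t ih => cases t <;> simp_all [List.intersperse]

lemma pvFoldrToList (xs : List String) :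
    (xs.foldr (· ++ ·) "").toList = (xs.map String.toList).flatten := by
  induction xs <;> simp_all

-- ''.join(xs) is plain concatenation
lemma pvJoinFoldr (xs : List String) : PySem.Str.join "" xs = xs.foldr (· ++ ·) "" := by
  apply String.toList_inj.mp
  rw [PySem.Str.toList_join, pvFoldrToList]
  simp [PySem.Chars.join, List.intercalate, pvFlattenIntersperse]

lemma pvRangeGetD (s : List String) (h : s.length = 8) :
    (List.range 8).map (fun k => s.getD k "") = s := by
  apply List.ext_getElem (by simp [h])
  intro k h1 h2
  simp [List.getD_eq_getElem?_getD, List.getElem?_eq_getElem h2]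

lemma pvMapRangeGetD (f : Nat → String) (k : Nat) (hk : k < 8) :
    ((List.range 8).map f).getD k "" = f k := by
  rw [List.getD_eq_getElem?_getD, List.getElem?_map]
  simp [hk]

lemma pvGetDSetNe (s : List String) (i k : Nat) (v : String) (h : i ≠ k) :
    (s.set i v).getD k "" = s.getD k "" := by
  rw [List.getD_eq_getElem?_getD, List.getElem?_set_ne h, ← List.getD_eq_getElem?_getD]

lemma pvGetDSetEq (s : List String) (i : Nat) (v : String) (h : i < s.length) :
    (s.set i v).getD i "" = v := by
  rw [List.getD_eq_getElem?_getD, List.getElem?_set_self h]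
  rfl

-- A's innermost loop (over enumerate(tile) with start offset a) characterised
lemma pvTileLoop (rows : List String) :
    ∀ (a : Nat) (s : List String), s.length = 8 → a + rows.length ≤ 10 →
    (PySem.List.enumerate rows (a : Int)).foldl
      (fun strings p =>
        if p.1 = 0 ∨ p.1 = 9 then strings
        else PySem.List.pySetD strings (p.1 - 1)
              (PySem.List.pyGetD strings (p.1 - 1) "" ++ pvMid p.2)) s
    = (List.range 8).map (fun k =>
        s.getD k "" ++ (if a ≤ k + 1 ∧ k + 1 < a + rows.length then pvMid (rows.getD (k + 1 - a) "") else "")) := by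
  induction rows with
  | nil =>
    intro a s hs _
    rw [PySem.List.enumerate_nil, List.foldl_nil]
    conv_lhs => rw [← pvRangeGetD s hs]
    apply List.map_congr_left
    intro k hk
    rw [List.length_nil, if_neg (by omega), String.append_empty]
  | cons r rest ih =>
    intro a s hs hb
    rw [PySem.List.enumerate_cons, List.foldl_cons]
    by_cases h0 : (a : Int) = 0 ∨ (a : Int) = 9
    · rcases h0 with h0 | h0
      · have ha : a = 0 := by exact_mod_cast h0
        subst ha
        rw [if_pos (Or.inl h0)]
        rw [show ((0 : Nat) : Int) + 1 = ((1 : Nat) : Int) by norm_num]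
        rw [ih 1 s hs (by simp at hb ⊢; omega)]
        apply List.map_congr_left
        intro k hk
        congr 1
        simp only [List.length_cons]
        by_cases hcond : k + 1 < rest.length + 1
        · rw [if_pos (by omega), if_pos (by omega),
             show k + 1 - 1 = k by omega, show k + 1 - 0 = k + 1 by omega,
             List.getD_cons_succ]
        · rw [if_neg (by omega), if_neg (by omega)]
      · have ha : a = 9 := by exact_mod_cast h0
        subst ha
        have hrest : rest = [] := by
          have := List.length_eq_zero_iff.mp (show rest.length = 0 by simp at hb; omega)
          exact this
        subst hrest
        rw [if_pos (Or.inr h0), PySem.List.enumerate_nil, List.foldl_nil]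
        conv_lhs => rw [← pvRangeGetD s hs]
        apply List.map_congr_left
        intro k hk
        rw [List.mem_range] at hk
        rw [if_neg (by simp; omega), String.append_empty]
    · rw [not_or] at h0
      obtain ⟨h01, h09⟩ := h0
      simp only [List.length_cons] at hb
      have ha1 : 1 ≤ a := by omega
      have ha8 : a ≤ 8 := by omega
      rw [if_neg (by rw [not_or]; exact ⟨h01, h09⟩)]
      rw [show (a : Int) - 1 = ((a - 1 : Nat) : Int) by omega,
          PySem.List.pySetD_natCast, PySem.List.pyGetD_natCast]
      rw [show (a : Int) + 1 = ((a + 1 : Nat) : Int) by push_cast; ring]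
      rw [ih (a + 1) _ (by simp [hs]) (by omega)]
      apply List.map_congr_left
      intro k hk
      rw [List.mem_range] at hk
      by_cases hka : k = a - 1
      · subst hka
        rw [pvGetDSetEq _ _ _ (by omega),
            if_neg (by omega), if_pos (by simp; omega),
            show a - 1 + 1 - a = 0 by omega, List.getD_cons_zero,
            String.append_empty]
      · rw [pvGetDSetNe _ _ _ _ (fun h => hka h.symm)]
        congr 1
        simp only [List.length_cons]
        by_cases hak : a ≤ k
        · by_cases hup : k + 1 < a + 1 + rest.length
          · rw [if_pos (by omega), if_pos (by omega),
               show k + 1 - a = (k - a) + 1 by omega, List.getD_cons_succ,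
               show k + 1 - (a + 1) = k - a by omega]
          · rw [if_neg (by omega), if_neg (by omega)]
        · rw [if_neg (by omega), if_neg (by omega)]

-- one pass of A's middle loop (one tile) on a state of length 8
lemma pvTileStep (t : List String) (s : List String) (hs : s.length = 8) (ht : t.length ≤ 10) :
    (PySem.List.enumerate t).foldl
      (fun strings p =>
        if p.1 = 0 ∨ p.1 = 9 then strings
        else PySem.List.pySetD strings (p.1 - 1)
              (PySem.List.pyGetD strings (p.1 - 1) "" ++ pvMid p.2)) s
    = (List.range 8).map (fun k => s.getD k "" ++ pvContrib t k) := by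
  have h := pvTileLoop t 0 s hs (by omega)
  rw [show ((0 : Nat) : Int) = 0 by norm_num] at h
  rw [h]
  apply List.map_congr_left
  intro k hk
  unfold pvContrib
  congr 1
  by_cases hc : k + 1 < t.length
  · rw [if_pos (by omega), if_pos hc, show k + 1 - 0 = k + 1 by omega]
  · rw [if_neg (by omega), if_neg hc]

-- A's middle loop over the tiles of one tile row
lemma pvRowLoop (tiles : List (List String)) :
    ∀ s : List String, s.length = 8 → (∀ t ∈ tiles, t.length ≤ 10) →
    tiles.foldl
      (fun strings tile =>
        (PySem.List.enumerate tile).foldl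
          (fun strings p =>
            if p.1 = 0 ∨ p.1 = 9 then strings
            else PySem.List.pySetD strings (p.1 - 1)
                  (PySem.List.pyGetD strings (p.1 - 1) "" ++ pvMid p.2)) strings) s
    = (List.range 8).map (fun k => s.getD k "" ++ pvCol tiles k) := by
  induction tiles with
  | nil =>
    intro s hs _
    rw [List.foldl_nil]
    conv_lhs => rw [← pvRangeGetD s hs]
    apply List.map_congr_left
    intro k hk
    rw [show pvCol [] k = "" from rfl, String.append_empty]
  | cons t rest ih =>
    intro s hs hall
    rw [List.foldl_cons, pvTileStep t s hs (hall t (by simp)),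
        ih _ (by simp) (fun u hu => hall u (by simp [hu]))]
    apply List.map_congr_left
    intro k hk
    rw [List.mem_range] at hk
    rw [pvMapRangeGetD _ k hk,
        show pvCol (t :: rest) k = pvContrib t k ++ pvCol rest k from rfl,
        String.append_assoc]

-- B's per-row join over the tiles equals the same column concatenation
lemma pvAltCol (tiles : List (List String)) (k : Nat) :
    PySem.Str.join ""
      (tiles.filterMap
        (fun t =>
          if (1 : Int) + (k : Int) < (t.length : Int) then some (pvMid (PySem.List.pyGetD t (1 + (k : Int)) ""))
          else none))
    = pvCol tiles k := by
  rw [pvJoinFoldr]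
  have hfun :
      (fun t : List String =>
        if (1 : Int) + (k : Int) < (t.length : Int) then some (pvMid (PySem.List.pyGetD t (1 + (k : Int)) ""))
        else none)
      = (fun t : List String =>
          if k + 1 < t.length then some (pvMid (t.getD (k + 1) "")) else none) := by
    funext u
    by_cases h : k + 1 < u.length
    · rw [if_pos (by omega : (1 : Int) + (k : Int) < (u.length : Int)), if_pos h,
          show (1 : Int) + (k : Int) = ((k + 1 : Nat) : Int) by push_cast; ring,
          PySem.List.pyGetD_natCast]
    · rw [if_neg (by omega : ¬(1 : Int) + (k : Int) < (u.length : Int)), if_neg h]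
  rw [hfun]
  induction tiles with
  | nil => rfl
  | cons t rest ih =>
    rw [show pvCol (t :: rest) k = pvContrib t k ++ pvCol rest k from rfl, ← ih]
    by_cases hc : k + 1 < t.length
    · rw [List.filterMap_cons_some
            (f := fun u : List String => if k + 1 < u.length then some (pvMid (u.getD (k + 1) "")) else none)
            (b := pvMid (t.getD (k + 1) ""))
            (by show (if k + 1 < t.length then some (pvMid (t.getD (k + 1) "")) else none) = _
                rw [if_pos hc]),
          List.foldr_cons]
      congr 1
      unfold pvContrib
      rw [if_pos hc]
    · rw [List.filterMap_cons_none
            (f := fun u : List String => if k + 1 < u.length then some (pvMid (u.getD (k + 1) "")) else none)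
            (by show (if k + 1 < t.length then some (pvMid (t.getD (k + 1) "")) else none) = none
                rw [if_neg hc])]
      unfold pvContrib
      rw [if_neg hc, String.empty_append]

-- B's inner map over range(1, 9)
lemma pvAltRow (tiles : List (List String)) :
    (PySem.List.pyRange 1 9 1).map
      (fun i =>
        PySem.Str.join ""
          (tiles.filterMap
            (fun t =>
              if i < (t.length : Int) then some (pvMid (PySem.List.pyGetD t i ""))
              else none)))
    = (List.range 8).map (fun k => pvCol tiles k) := by
  rw [PySem.List.pyRange_one, List.map_map,
      show ((9 : Int) - 1).toNat = 8 from rfl]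
  apply List.map_congr_left
  intro k hk
  exact pvAltCol tiles k

-- one tile row: A's accumulator result = B's joined rows
lemma pvRowEq (tr : List (List String)) (h : ∀ t ∈ tr, t.length ≤ 10) :
    tr.foldl
      (fun strings tile =>
        (PySem.List.enumerate tile).foldl
          (fun strings p =>
            if p.1 = 0 ∨ p.1 = 9 then strings
            else PySem.List.pySetD strings (p.1 - 1)
                  (PySem.List.pyGetD strings (p.1 - 1) "" ++ pvMid p.2)) strings)
      (List.replicate 8 "")
    = (PySem.List.pyRange 1 9 1).map
        (fun i =>
          PySem.Str.join ""
            (tr.filterMap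
              (fun t =>
                if i < (t.length : Int) then some (pvMid (PySem.List.pyGetD t i ""))
                else none))) := by
  rw [pvRowLoop tr _ (by simp) h, pvAltRow tr]
  apply List.map_congr_left
  intro k hk
  have : (List.replicate 8 "").getD k "" = "" := by
    rw [List.getD_eq_getElem?_getD, List.getElem?_replicate]
    split <;> rfl
  rw [this, String.empty_append]

theorem extract_actual_image_spec : Claim_equal_extract_actual_image := by
  intro image hdom hpre
  clear hdom
  unfold Spec_extract_actual_image extract_actual_image extract_actual_image_alt
  rw [PySem.List.foldl_append_eq_flatMap, PySem.List.foldl_append_eq_flatMap,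
      List.nil_append, List.nil_append]
  revert hpre
  unfold Pre_extract_actual_image
  induction image with
  | nil => intro _; rfl
  | cons tr rest ih =>
    intro hpre
    rw [List.flatMap_cons, List.flatMap_cons,
        pvRowEq tr (hpre tr (by simp)),
        ih (fun x hx t ht => hpre x (List.mem_cons_of_mem tr hx) t ht)]
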